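-- pv_equiv track=rewrite | github.com/harshp1509/python-training | 13thfeb/temp.py | generate_pattern
-- ===== SOURCE A (Python) =====
-- def generate_pattern(a):
--     pattern = []
--     for i in range(1, a + 1):
--         row = []
--         for j in range(1, i + 1):
--             row.append(j)
--         row += [0] * (a - i)
--         pattern.append(row)
--     return pattern
-- ===== SOURCE B (Python) =====
-- def generate_pattern(a):
--     return [[j if j <= i else 0 for j in range(1, a + 1)] for i in range(1, a + 1)]
-- ===== Notes on version B (the rewrite author's own statement) =====
-- stated objective: simpler
-- what changed: B builds each row in one uniform column sweep (j if j<=i else 0 for each j in 1..a) instead of A's two-phase row construction (append-loop for 1..i, then concatenate a zero tail of length a-i).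
import Mathlib
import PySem

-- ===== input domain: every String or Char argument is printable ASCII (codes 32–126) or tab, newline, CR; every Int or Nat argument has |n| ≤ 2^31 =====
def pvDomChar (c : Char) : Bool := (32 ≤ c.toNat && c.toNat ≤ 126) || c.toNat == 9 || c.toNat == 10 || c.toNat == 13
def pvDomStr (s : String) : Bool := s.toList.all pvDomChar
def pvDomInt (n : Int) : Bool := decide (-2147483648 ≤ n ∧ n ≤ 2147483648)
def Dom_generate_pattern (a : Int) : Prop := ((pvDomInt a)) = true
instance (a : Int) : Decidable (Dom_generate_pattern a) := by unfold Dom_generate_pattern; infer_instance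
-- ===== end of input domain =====

-- B builds each row by one uniform column sweep instead of A's append-loop plus zero tail; objective: simpler.

-- ===== PORT A =====
def generate_pattern (a : Int) : List (List Int) :=
  (PySem.List.pyRange 1 (a + 1) 1).foldl (fun pattern i =>
    let row := (PySem.List.pyRange 1 (i + 1) 1).foldl (fun row j => row ++ [j]) []
    let row := row ++ List.replicate (a - i).toNat 0
    pattern ++ [row]) []

-- ===== PORT B =====
def generate_pattern_alt (a : Int) : List (List Int) :=
  (PySem.List.pyRange 1 (a + 1) 1).map (fun i =>
    (PySem.List.pyRange 1 (a + 1) 1).map (fun j => if j ≤ i then j else 0))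

-- ===== PRECONDITION & SPEC =====
def Spec_generate_pattern (a : Int) (out : List (List Int)) : Prop := out = generate_pattern_alt a
instance (a : Int) (out : List (List Int)) : Decidable (Spec_generate_pattern a out) := by unfold Spec_generate_pattern; infer_instance

-- ===== CLAIM (what is proved, stated in full; the proofs are below) =====
def Claim_equal_generate_pattern : Prop := ∀ (a : Int), Dom_generate_pattern a → Spec_generate_pattern a (generate_pattern a)

-- ===== LEMMAS AND PROOFS =====

theorem gp_row_eq (a i : Int) (h1 : 1 ≤ i) (h2 : i ≤ a) :
    PySem.List.pyRange 1 (i + 1) 1 ++ List.replicate (a - i).toNat 0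
      = (PySem.List.pyRange 1 (a + 1) 1).map (fun j => if j ≤ i then j else 0) := by
  rw [PySem.List.pyRange_one_append 1 (i + 1) (a + 1) (by omega) (by omega), List.map_append]
  congr 1
  · rw [List.map_congr_left (g := id) (fun j hj => by
      rw [PySem.List.mem_pyRange_one] at hj
      simp only [id]
      rw [if_pos (by omega)])]
    exact (List.map_id _).symm
  · rw [List.map_congr_left (g := fun _ => (0 : Int)) (fun j hj => by
      rw [PySem.List.mem_pyRange_one] at hj
      rw [if_neg (by omega)])]
    rw [List.map_const', PySem.List.length_pyRange_one]
    congr 1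
    omega

-- ===== VERDICT (by name: the statement is the Claim_ definition above) =====
theorem generate_pattern_spec : Claim_equal_generate_pattern := by
  intro a _
  unfold Spec_generate_pattern generate_pattern generate_pattern_alt
  simp only [PySem.List.foldl_append_singleton_eq_self, List.nil_append]
  rw [PySem.List.foldl_append_singleton_eq_map]
  rw [List.nil_append]
  exact List.map_congr_left (fun i hi => by
    rw [PySem.List.mem_pyRange_one] at hi
    exact gp_row_eq a i hi.1 (by omega))
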